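-- pv_equiv track=rewrite | github.com/kwoneyng/beakjoon | 징검다리 건너기.py | solution
-- ===== SOURCE A (Python) =====
-- def solution(stones, k):
--     answer = 0
--     l,r = 0, max(stones)
--     while l <= r:
--         m = (l+r)//2
--         stop = 0
--         for st in stones:
--             if st < m:
--                 stop += 1
--                 if stop >= k:
--                     r = m-1
--                     break
--             else:
--                 stop = 0
--         else:
--             answer = m
--             l = m+1
--
--     return answer
-- ===== SOURCE B (Python) =====
-- def solution(stones, k):
--     hi = max(stones)
--     n = len(stones)
--     best = hi
--     for i in range(n - k + 1):
--         best = min(best, max(stones[i:i+k]))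
--     return max(0, best)
-- ===== Notes on version B (the rewrite author's own statement) =====
-- stated objective: alternative
-- what changed: Replaces A's binary search over the answer (each probe rescanning all stones with a run counter) by a direct computation: the answer is the minimum over all k-windows of the window maximum, clamped below at 0.
-- outside the precondition, e.g. on solution([3, 1], 0): A returns 1, B raises ValueError
import Mathlib
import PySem

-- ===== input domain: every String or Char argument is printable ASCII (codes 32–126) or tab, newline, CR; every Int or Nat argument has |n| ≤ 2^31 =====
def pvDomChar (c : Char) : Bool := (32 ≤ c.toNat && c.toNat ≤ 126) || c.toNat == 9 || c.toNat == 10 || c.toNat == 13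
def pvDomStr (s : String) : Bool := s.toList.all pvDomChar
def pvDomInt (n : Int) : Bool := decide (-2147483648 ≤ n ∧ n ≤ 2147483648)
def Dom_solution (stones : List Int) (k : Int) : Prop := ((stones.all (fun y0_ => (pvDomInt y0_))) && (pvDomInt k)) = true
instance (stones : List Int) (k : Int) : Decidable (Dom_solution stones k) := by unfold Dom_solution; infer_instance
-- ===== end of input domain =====

-- B changes the algorithm: instead of A's binary search over the answer with a run-counter scan
-- per probe, B takes the min over all k-windows of the window maximum (clamped at 0); same
-- return value on Pre_ (nonempty stones, k ≥ 1), objective: alternative.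

-- ===== PORT A =====
-- A's inner for-loop over stones with the 'stop' run counter; returns false iff it breaks.
def checkLoop (m k : Int) (stop : Int) : List Int → Bool
  | [] => true
  | st :: rest =>
    if st < m then
      if stop + 1 ≥ k then false else checkLoop m k (stop + 1) rest
    else checkLoop m k 0 rest

-- A's while-loop: binary search on m with state (l, r, answer).
def bsearch (stones : List Int) (k : Int) (l r answer : Int) : Int :=
  if h : l ≤ r then
    let m := PySem.Int.floordiv (l + r) 2
    if checkLoop m k 0 stones then bsearch stones k (m + 1) r m
    else bsearch stones k l (m - 1) answer
  else answer
termination_by (r + 1 - l).toNat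
decreasing_by
  · have := PySem.Int.floordiv_two_mid_bounds h
    omega
  · have := PySem.Int.floordiv_two_mid_bounds h
    omega

def solution (stones : List Int) (k : Int) : Int :=
  match PySem.List.max? stones (fun x => x) with
  | none => 0  -- Python: max([]) raises ValueError; excluded by Pre_
  | some r => bsearch stones k 0 r 0

-- ===== PORT B =====
-- max(stones[i:i+k]); Python raises on an empty slice (k ≤ 0), excluded by Pre_
def winMax (stones : List Int) (k i : Int) : Int :=
  (PySem.List.max? (PySem.List.slice stones (some i) (some (i + k))) (fun x => x)).getD 0

def solution_alt (stones : List Int) (k : Int) : Int :=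
  match PySem.List.max? stones (fun x => x) with
  | none => 0  -- Python: max([]) raises ValueError; excluded by Pre_
  | some hi =>
    let n : Int := stones.length
    let best :=
      (PySem.List.pyRange 0 (n - k + 1) 1).foldl (fun best i => min best (winMax stones k i)) hi
    max 0 best

-- ===== PRECONDITION & SPEC =====
-- Pre_ excludes the empty list, where both A and B raise ValueError (max of empty sequence),
-- and k ≤ 0 — outside the natural domain of a run length — where B raises ValueError on the
-- empty slice while A happens to return the value it gives for k = 1.
def Pre_solution (stones : List Int) (k : Int) : Prop := stones ≠ [] ∧ 1 ≤ k
instance (stones : List Int) (k : Int) : Decidable (Pre_solution stones k) := by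
  unfold Pre_solution; infer_instance

def pvWitness_solution : List Int × Int := ([2, 4, 5, 3, 2, 1, 4], 3)

def Spec_solution (stones : List Int) (k : Int) (out : Int) : Prop := out = solution_alt stones k
instance (stones : List Int) (k : Int) (out : Int) : Decidable (Spec_solution stones k out) := by
  unfold Spec_solution; infer_instance

-- ===== CLAIM (what is proved, stated in full; the proofs are below) =====
def Claim_equal_solution : Prop := ∀ (stones : List Int) (k : Int), Dom_solution stones k → Pre_solution stones k → Spec_solution stones k (solution stones k)

-- ===== LEMMAS AND PROOFS =====

-- the window (stones[i:i+K]) as drop/take on Nat indices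
def win (stones : List Int) (K i : Nat) : List Int := (stones.drop i).take K

-- a member of a shorter prefix is a member of a longer one
theorem mem_take_mono {α : Type} {l : List α} {K t : Nat} (h : K ≤ t) {y : α}
    (hy : y ∈ l.take K) : y ∈ l.take t := by
  have heq : l.take K = (l.take t).take K := by
    rw [List.take_take, Nat.min_eq_left h]
  exact List.mem_of_mem_take (heq ▸ hy)

-- if no prefix run of k bad stones fits (counting s), the first window has a stone ≥ m
theorem window0_of_C1 (m k s : Int) (xs : List Int) (hk : 1 ≤ k) (hs : 0 ≤ s)
    (C1 : ∀ t : Nat, 1 ≤ t → t ≤ xs.length → (∀ y ∈ xs.take t, y < m) → s + t < k)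
    (hle : k.toNat ≤ xs.length) : ∃ y ∈ win xs k.toNat 0, m ≤ y := by
  by_cases hall : ∀ y ∈ xs.take k.toNat, y < m
  · have := C1 k.toNat (by omega) hle hall
    omega
  · push_neg at hall
    obtain ⟨y, hy, hym⟩ := hall
    exact ⟨y, by simpa [win] using hy, hym⟩

-- characterization of A's inner loop, generalized over the incoming counter s
theorem checkLoop_iff (m k : Int) (hk : 1 ≤ k) :
    ∀ (xs : List Int) (s : Int), 0 ≤ s →
      (checkLoop m k s xs = true ↔
        ((∀ t : Nat, 1 ≤ t → t ≤ xs.length → (∀ y ∈ xs.take t, y < m) → s + t < k) ∧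
         (∀ i : Nat, 1 ≤ i → i + k.toNat ≤ xs.length → ∃ y ∈ win xs k.toNat i, m ≤ y))) := by
  intro xs
  induction xs with
  | nil =>
    intro s hs
    simp only [checkLoop, List.length_nil]
    constructor
    · intro _
      exact ⟨fun t ht hle _ => by omega, fun i hi hle => by omega⟩
    · intro _; trivial
  | cons x xs ih =>
    intro s hs
    by_cases hx : x < m
    · by_cases hbig : s + 1 ≥ k
      · simp only [checkLoop, if_pos hx, if_pos hbig]
        constructor
        · intro h; cases h
        · rintro ⟨C1, C2⟩
          have hall : ∀ y ∈ (x :: xs).take 1, y < m := by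
            intro y hy
            simp only [List.take_succ_cons, List.take_zero, List.mem_singleton] at hy
            exact hy ▸ hx
          exact absurd (C1 1 le_rfl (by simp) hall) (by omega)
      · have hrec := ih (s + 1) (by omega)
        simp only [checkLoop, if_pos hx, if_neg hbig]
        rw [hrec]
        constructor
        · rintro ⟨C1', C2'⟩
          constructor
          · intro t ht hle hall
            obtain ⟨u, rfl⟩ : ∃ u, t = u + 1 := ⟨t - 1, by omega⟩
            rcases Nat.eq_zero_or_pos u with hu | hu
            · subst hu; omega
            · have hall' : ∀ y ∈ xs.take u, y < m := by
                intro y hy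
                exact hall y (by simp only [List.take_succ_cons, List.mem_cons]; exact Or.inr hy)
              have := C1' u hu (by simp at hle; omega) hall'
              omega
          · intro i hi hle
            obtain ⟨j, rfl⟩ : ∃ j, i = j + 1 := ⟨i - 1, by omega⟩
            have hwin : win (x :: xs) k.toNat (j + 1) = win xs k.toNat j := by
              simp [win, List.drop_succ_cons]
            rw [hwin]
            rcases Nat.eq_zero_or_pos j with hj | hj
            · subst hj
              exact window0_of_C1 m k (s + 1) xs hk (by omega) C1' (by simp at hle; omega)
            · exact C2' j hj (by simp at hle; omega)
        · rintro ⟨C1, C2⟩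
          constructor
          · intro t ht hle hall
            have hall' : ∀ y ∈ (x :: xs).take (t + 1), y < m := by
              intro y hy
              simp only [List.take_succ_cons, List.mem_cons] at hy
              rcases hy with rfl | hy
              · exact hx
              · exact hall y hy
            have := C1 (t + 1) (by omega) (by simp; omega) hall'
            omega
          · intro i hi hle
            have hwin : win (x :: xs) k.toNat (i + 1) = win xs k.toNat i := by
              simp [win, List.drop_succ_cons]
            have := C2 (i + 1) (by omega) (by simp; omega)
            rw [hwin] at this; exact this
    · have hrec := ih 0 le_rfl
      simp only [checkLoop, if_neg hx]
      rw [hrec]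
      constructor
      · rintro ⟨C1', C2'⟩
        constructor
        · intro t ht hle hall
          exfalso
          have hxmem : x ∈ (x :: xs).take t := by
            obtain ⟨u, rfl⟩ : ∃ u, t = u + 1 := ⟨t - 1, by omega⟩
            simp [List.take_succ_cons]
          exact hx (hall x hxmem)
        · intro i hi hle
          obtain ⟨j, rfl⟩ : ∃ j, i = j + 1 := ⟨i - 1, by omega⟩
          have hwin : win (x :: xs) k.toNat (j + 1) = win xs k.toNat j := by
            simp [win, List.drop_succ_cons]
          rw [hwin]
          rcases Nat.eq_zero_or_pos j with hj | hj
          · subst hj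
            exact window0_of_C1 m k 0 xs hk le_rfl C1' (by simp at hle; omega)
          · exact C2' j hj (by simp at hle; omega)
      · rintro ⟨C1, C2⟩
        constructor
        · intro t ht hle hall
          by_contra hcon
          have hKt : k.toNat ≤ t := by omega
          have hwin : win (x :: xs) k.toNat 1 = win xs k.toNat 0 := by
            simp [win, List.drop_succ_cons]
          obtain ⟨y, hy, hym⟩ := C2 1 le_rfl (by simp at hle ⊢; omega)
          rw [hwin] at hy
          have hy' : y ∈ xs.take t := mem_take_mono hKt (by simpa [win] using hy)
          exact absurd (hall y hy') (not_lt.mpr hym)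
        · intro i hi hle
          have hwin : win (x :: xs) k.toNat (i + 1) = win xs k.toNat i := by
            simp [win, List.drop_succ_cons]
          have := C2 (i + 1) (by omega) (by simp; omega)
          rw [hwin] at this; exact this

-- A's check at s = 0 says: every k-window contains a stone ≥ m
theorem checkLoop_zero_iff (m k : Int) (hk : 1 ≤ k) (xs : List Int) :
    checkLoop m k 0 xs = true ↔
      (∀ i : Nat, i + k.toNat ≤ xs.length → ∃ y ∈ win xs k.toNat i, m ≤ y) := by
  rw [checkLoop_iff m k hk xs 0 le_rfl]
  constructor
  · rintro ⟨C1, C2⟩ i hle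
    rcases Nat.eq_zero_or_pos i with hi | hi
    · subst hi
      exact window0_of_C1 m k 0 xs hk le_rfl C1 (by omega)
    · exact C2 i hi hle
  · intro H
    constructor
    · intro t ht hle hall
      by_contra hcon
      have hKt : k.toNat ≤ t := by omega
      obtain ⟨y, hy, hym⟩ := H 0 (by omega)
      have hy' : y ∈ xs.take t := mem_take_mono hKt (by simpa [win] using hy)
      exact absurd (hall y hy') (not_lt.mpr hym)
    · intro i _ hle
      exact H i hle

-- folding min over f-images
theorem le_foldl_min (f : Int → Int) (m : Int) :
    ∀ (l : List Int) (a : Int),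
      (m ≤ l.foldl (fun b i => min b (f i)) a ↔ m ≤ a ∧ ∀ i ∈ l, m ≤ f i) := by
  intro l
  induction l with
  | nil => simp
  | cons x xs ih =>
    intro a
    simp only [List.foldl_cons, ih (min a (f x)), le_min_iff, List.mem_cons]
    constructor
    · rintro ⟨⟨h1, h2⟩, h3⟩
      exact ⟨h1, by rintro i (rfl | hi); exact h2; exact h3 i hi⟩
    · rintro ⟨h1, h2⟩
      exact ⟨⟨h1, h2 x (Or.inl rfl)⟩, fun i hi => h2 i (Or.inr hi)⟩

theorem foldl_min_le_init (f : Int → Int) :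
    ∀ (l : List Int) (a : Int), l.foldl (fun b i => min b (f i)) a ≤ a := by
  intro l
  induction l with
  | nil => simp
  | cons x xs ih =>
    intro a
    calc xs.foldl (fun b i => min b (f i)) (min a (f x)) ≤ min a (f x) := ih _
    _ ≤ a := min_le_left _ _

-- the binary search returns min T r (or answer) for any threshold T matching the check on [0, hi]
theorem bsearch_eq (stones : List Int) (k hi T : Int)
    (H : ∀ m : Int, 0 ≤ m → m ≤ hi → (checkLoop m k 0 stones = true ↔ m ≤ T)) :
    ∀ (N : Nat) (l r ans : Int), (r + 1 - l).toNat ≤ N → 0 ≤ l → r ≤ hi →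
      bsearch stones k l r ans = if l ≤ r ∧ l ≤ T then min T r else ans := by
  intro N
  induction N with
  | zero =>
    intro l r ans hN hl hr
    rw [bsearch]
    have hlr : ¬ l ≤ r := by omega
    simp [hlr]
  | succ N ih =>
    intro l r ans hN hl hr
    rw [bsearch]
    by_cases hlr : l ≤ r
    · have hm := PySem.Int.floordiv_two_mid_bounds hlr
      set m := PySem.Int.floordiv (l + r) 2 with hmdef
      simp only [hlr, dif_pos]
      by_cases hchk : checkLoop m k 0 stones = true
      · have hmT : m ≤ T := (H m (by omega) (by omega)).mp hchk
        simp only [hchk, if_pos]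
        rw [ih (m + 1) r m (by omega) (by omega) hr]
        simp only [true_and, min_def]; split_ifs <;> omega
      · have hTm : ¬ m ≤ T := fun h => hchk ((H m (by omega) (by omega)).mpr h)
        simp only [hchk, if_false, Bool.false_eq_true]
        rw [ih l (m - 1) ans (by omega) hl (by omega)]
        simp only [true_and, min_def]; split_ifs <;> omega
    · simp [hlr]

-- B's window max is the max of the drop/take window
theorem winMax_spec (stones : List Int) (k i : Int) (hk : 1 ≤ k) (hi0 : 0 ≤ i)
    (hle : i.toNat + k.toNat ≤ stones.length) :
    winMax stones k i ∈ win stones k.toNat i.toNat ∧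
      ∀ y ∈ win stones k.toNat i.toNat, y ≤ winMax stones k i := by
  have hsl : PySem.List.slice stones (some i) (some (i + k)) = win stones k.toNat i.toNat := by
    rw [PySem.List.slice_toNat stones hi0 (by omega : (0:Int) ≤ i + k)]
    unfold win
    congr 1
    omega
  have hwne : win stones k.toNat i.toNat ≠ [] := by
    unfold win
    intro h
    have := congrArg List.length h
    simp only [List.length_take, List.length_drop, List.length_nil] at this
    omega
  unfold winMax
  rw [hsl]
  cases hm : PySem.List.max? (win stones k.toNat i.toNat) (fun x => x) with
  | none => exact absurd ((PySem.List.max?_eq_none_iff _ _).mp hm) hwne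
  | some w =>
    simp only [Option.getD_some]
    exact ⟨PySem.List.max?_mem hm, fun y hy => PySem.List.max?_isMax hm y hy⟩

-- A's check succeeds at m iff m is at most B's folded threshold
theorem check_iff_T (stones : List Int) (k hi : Int) (hk : 1 ≤ k) (m : Int) (hm : m ≤ hi) :
    (checkLoop m k 0 stones = true ↔
      m ≤ (PySem.List.pyRange 0 ((stones.length : Int) - k + 1) 1).foldl
            (fun b i => min b (winMax stones k i)) hi) := by
  rw [checkLoop_zero_iff m k hk stones, le_foldl_min (winMax stones k) m]
  constructor
  · intro H
    refine ⟨hm, fun i hiL => ?_⟩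
    rw [PySem.List.mem_pyRange_one] at hiL
    obtain ⟨h0, h1⟩ := hiL
    have hle : i.toNat + k.toNat ≤ stones.length := by omega
    obtain ⟨-, hmaxw⟩ := winMax_spec stones k i hk h0 hle
    obtain ⟨y, hy, hym⟩ := H i.toNat hle
    exact le_trans hym (hmaxw y hy)
  · rintro ⟨-, H⟩ j hle
    have hiL : (j : Int) ∈ PySem.List.pyRange 0 ((stones.length : Int) - k + 1) 1 := by
      rw [PySem.List.mem_pyRange_one]
      omega
    have h := H j hiL
    obtain ⟨hmem, -⟩ := winMax_spec stones k (j : Int) hk (by positivity) (by simpa using hle)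
    exact ⟨winMax stones k (j : Int), by simpa using hmem, h⟩

-- ===== VERDICT (by name: the statement is the Claim_ definition above) =====
theorem solution_spec : Claim_equal_solution := by
  intro stones k hdom hpre
  obtain ⟨hne, hk⟩ := hpre
  unfold Spec_solution solution solution_alt
  cases hmax : PySem.List.max? stones (fun x => x) with
  | none => exact absurd ((PySem.List.max?_eq_none_iff _ _).mp hmax) hne
  | some hi =>
    simp only
    have hH : ∀ m : Int, 0 ≤ m → m ≤ hi →
        (checkLoop m k 0 stones = true ↔
          m ≤ (PySem.List.pyRange 0 ((stones.length : Int) - k + 1) 1).foldl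
                (fun b i => min b (winMax stones k i)) hi) :=
      fun m _ hmhi => check_iff_T stones k hi hk m hmhi
    have hbs := bsearch_eq stones k hi _ hH (hi + 1 - 0).toNat 0 hi 0 le_rfl le_rfl le_rfl
    have hThi := foldl_min_le_init (winMax stones k)
      (PySem.List.pyRange 0 ((stones.length : Int) - k + 1) 1) hi
    set T := (PySem.List.pyRange 0 ((stones.length : Int) - k + 1) 1).foldl
      (fun b i => min b (winMax stones k i)) hi with hT
    rw [hbs]
    simp only [min_def, max_def]
    split_ifs <;> omega
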